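-- pv_equiv track=rewrite | github.com/ifsvivek/Symbiote | agents/style_learner.py | _analyze_complexity_distribution
-- ===== SOURCE A (Python) =====
-- from typing import Dict, List, Any, Optional, Tuple
--
-- def _analyze_complexity_distribution(functions: List[Dict]) -> Dict[str, int]:
--     """Analyze complexity distribution."""
--     distribution = {"low": 0, "medium": 0, "high": 0}
--
--     for func in functions:
--         complexity = func.get("complexity", 1)
--         if complexity <= 5:
--             distribution["low"] += 1
--         elif complexity <= 10:
--             distribution["medium"] += 1
--         else:
--             distribution["high"] += 1
--
--     return distribution
-- ===== SOURCE B (Python) =====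
-- def _analyze_complexity_distribution(functions):
--     """Analyze complexity distribution (count-based re-implementation)."""
--     cs = [func.get("complexity", 1) for func in functions]
--     low = sum(1 for c in cs if c <= 5)
--     medium = sum(1 for c in cs if 5 < c <= 10)
--     return {"low": low, "medium": medium, "high": len(cs) - low - medium}
-- ===== Notes on version B (the rewrite author's own statement) =====
-- stated objective: idiomatic
-- what changed: Replaces the single dict-mutating loop with an extracted complexity list and per-bucket counting (low and medium counted by predicate, high derived as the remainder), building the result dict once at the end.
import Mathlib
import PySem

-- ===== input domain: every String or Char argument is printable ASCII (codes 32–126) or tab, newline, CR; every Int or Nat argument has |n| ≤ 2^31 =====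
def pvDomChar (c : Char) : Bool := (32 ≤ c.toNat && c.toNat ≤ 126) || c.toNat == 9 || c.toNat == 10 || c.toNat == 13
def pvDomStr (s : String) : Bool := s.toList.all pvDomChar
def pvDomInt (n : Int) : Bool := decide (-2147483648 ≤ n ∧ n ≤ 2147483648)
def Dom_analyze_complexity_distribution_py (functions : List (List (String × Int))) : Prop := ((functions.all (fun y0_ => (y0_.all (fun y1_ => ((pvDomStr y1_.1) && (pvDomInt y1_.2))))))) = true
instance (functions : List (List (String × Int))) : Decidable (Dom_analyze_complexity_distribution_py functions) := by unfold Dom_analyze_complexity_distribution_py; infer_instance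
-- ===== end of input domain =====

-- B replaces A's dict-mutating loop with per-bucket predicate counting over the extracted complexity list (idiomatic; same O(n) cost).


-- ===== PORT A =====
def analyze_complexity_distribution_py (functions : List (List (String × Int))) : List (String × Int) :=
  let distribution : PySem.Dict String Int := PySem.Dict.mk [("low", 0), ("medium", 0), ("high", 0)]
  (functions.foldl (fun distribution func =>
    let complexity := (PySem.Dict.mk func).getD "complexity" 1
    if complexity ≤ 5 then distribution.modify "low" 0 (· + 1)
    else if complexity ≤ 10 then distribution.modify "medium" 0 (· + 1)
    else distribution.modify "high" 0 (· + 1)) distribution).items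

-- ===== PORT B =====
def analyze_complexity_distribution_py_alt (functions : List (List (String × Int))) : List (String × Int) :=
  let cs := functions.map (fun func => (PySem.Dict.mk func).getD "complexity" 1)
  let low : Int := cs.countP (fun c => decide (c ≤ 5))
  let medium : Int := cs.countP (fun c => decide (5 < c) && decide (c ≤ 10))
  [("low", low), ("medium", medium), ("high", (cs.length : Int) - low - medium)]

-- ===== PRECONDITION & SPEC =====
def Spec_analyze_complexity_distribution_py (functions : List (List (String × Int))) (out : List (String × Int)) : Prop := out = analyze_complexity_distribution_py_alt functions
instance (functions : List (List (String × Int))) (out : List (String × Int)) : Decidable (Spec_analyze_complexity_distribution_py functions out) := by unfold Spec_analyze_complexity_distribution_py; infer_instance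

-- ===== CLAIM (what is proved, stated in full; the proofs are below) =====
def Claim_equal_analyze_complexity_distribution_py : Prop := ∀ (functions : List (List (String × Int))), Dom_analyze_complexity_distribution_py functions → Spec_analyze_complexity_distribution_py functions (analyze_complexity_distribution_py functions)

-- ===== LEMMAS AND PROOFS =====


def pvC (func : List (String × Int)) : Int := (PySem.Dict.mk func).getD "complexity" 1

def pvStep (d : PySem.Dict String Int) (func : List (String × Int)) : PySem.Dict String Int :=
  let complexity := pvC func
  if complexity ≤ 5 then d.modify "low" 0 (· + 1)
  else if complexity ≤ 10 then d.modify "medium" 0 (· + 1)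
  else d.modify "high" 0 (· + 1)

lemma pv_loop (fs : List (List (String × Int))) (l m h : Int) :
    (fs.foldl pvStep (PySem.Dict.mk [("low", l), ("medium", m), ("high", h)])).items
      = [("low", l + ((fs.map pvC).countP (fun c => decide (c ≤ 5)) : Int)),
         ("medium", m + ((fs.map pvC).countP (fun c => decide (5 < c) && decide (c ≤ 10)) : Int)),
         ("high", h + ((fs.map pvC).countP (fun c => decide (10 < c)) : Int))] := by
  induction fs generalizing l m h with
  | nil => simp
  | cons f fs ih =>
    simp only [List.foldl_cons, List.map_cons, List.countP_cons]
    by_cases h5 : pvC f ≤ 5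
    · have hst : pvStep (PySem.Dict.mk [("low", l), ("medium", m), ("high", h)]) f
          = PySem.Dict.mk [("low", l + 1), ("medium", m), ("high", h)] := by
        simp [pvStep, h5, PySem.Dict.modify, PySem.Dict.get?, PySem.Dict.getD,
          PySem.Dict.insert, PySem.Dict.contains]
      rw [hst, ih]
      have h1 : ¬ (5 < pvC f) := by omega
      have h2 : ¬ (10 < pvC f) := by omega
      simp only [h5, h1, h2, decide_true, decide_false, Bool.false_and, if_true,
        List.cons.injEq, Prod.mk.injEq, and_true, true_and]
      refine ⟨by push_cast; ring, rfl, rfl⟩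
    · by_cases h10 : pvC f ≤ 10
      · have hst : pvStep (PySem.Dict.mk [("low", l), ("medium", m), ("high", h)]) f
            = PySem.Dict.mk [("low", l), ("medium", m + 1), ("high", h)] := by
          simp [pvStep, h5, h10, PySem.Dict.modify, PySem.Dict.get?, PySem.Dict.getD,
            PySem.Dict.insert, PySem.Dict.contains]
        rw [hst, ih]
        have h1 : 5 < pvC f := by omega
        have h2 : ¬ (10 < pvC f) := by omega
        simp only [h5, h1, h2, h10, decide_true, decide_false, Bool.true_and, if_true,
          List.cons.injEq, Prod.mk.injEq, and_true, true_and]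
        refine ⟨rfl, by push_cast; ring, rfl⟩
      · have hst : pvStep (PySem.Dict.mk [("low", l), ("medium", m), ("high", h)]) f
            = PySem.Dict.mk [("low", l), ("medium", m), ("high", h + 1)] := by
          simp [pvStep, h5, h10, PySem.Dict.modify, PySem.Dict.get?, PySem.Dict.getD,
            PySem.Dict.insert, PySem.Dict.contains]
        rw [hst, ih]
        have h1 : ¬ (pvC f ≤ 10) := h10
        have h2 : 10 < pvC f := by omega
        simp only [h5, h1, h2, decide_true, decide_false, Bool.and_false, if_true,
          List.cons.injEq, Prod.mk.injEq, and_true, true_and]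
        refine ⟨rfl, rfl, by push_cast; ring⟩

lemma pv_partition (cs : List Int) :
    (cs.countP (fun c => decide (10 < c)) : Int)
      = (cs.length : Int) - (cs.countP (fun c => decide (c ≤ 5)) : Int)
          - (cs.countP (fun c => decide (5 < c) && decide (c ≤ 10)) : Int) := by
  induction cs with
  | nil => simp
  | cons c cs ih =>
    simp only [List.countP_cons, List.length_cons]
    by_cases h5 : c ≤ 5
    · have h1 : ¬ (5 < c) := by omega
      have h2 : ¬ (10 < c) := by omega
      simp only [h5, h1, h2, decide_true, decide_false, Bool.false_and, if_true]
      push_cast; omega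
    · by_cases h10 : c ≤ 10
      · have h1 : 5 < c := by omega
        have h2 : ¬ (10 < c) := by omega
        simp only [h5, h1, h2, h10, decide_true, decide_false, Bool.true_and, if_true]
        push_cast; omega
      · have h2 : 10 < c := by omega
        simp only [h5, h10, h2, decide_true, decide_false, Bool.and_false, if_true]
        push_cast; omega

-- ===== VERDICT (by name: the statement is the Claim_ definition above) =====
theorem analyze_complexity_distribution_py_spec : Claim_equal_analyze_complexity_distribution_py := by
  intro functions _
  unfold Spec_analyze_complexity_distribution_py
  show (functions.foldl pvStep (PySem.Dict.mk [("low", 0), ("medium", 0), ("high", 0)])).items = _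
  rw [pv_loop]
  show _ = [("low", ((functions.map pvC).countP (fun c => decide (c ≤ 5)) : Int)),
            ("medium", ((functions.map pvC).countP (fun c => decide (5 < c) && decide (c ≤ 10)) : Int)),
            ("high", ((functions.map pvC).length : Int)
              - ((functions.map pvC).countP (fun c => decide (c ≤ 5)) : Int)
              - ((functions.map pvC).countP (fun c => decide (5 < c) && decide (c ≤ 10)) : Int))]
  rw [pv_partition (functions.map pvC)]
  simp
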